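-- pv_equiv track=rewrite | github.com/KausikN/GigaCode | AudioVideoProcessing.py | GetFullMainSeq
-- ===== SOURCE A (Python) =====
-- def GetFullMainSeq(MainSeq, SubSeqs):
--     SubSeqsFull = {}
--     FullMainSeq = []
--
--     for s in MainSeq:
--         if s[0] == 'M':
--             FullMainSeq.append([s[1], s[2]])
--         elif s[0] == 'S':
--             if s[1] not in SubSeqsFull.keys():
--                 SubSeqsFull[s[1]] = []
--                 SubSeqsFull[s[1]] = GetFullMainSeq(SubSeqs[s[1]], SubSeqs)
--             FullMainSeq.extend(SubSeqsFull[s[1]])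
--         elif s[0] == 'D':
--             FullMainSeq.append([s[1], s[2]])
--     return FullMainSeq
-- ===== SOURCE B (Python) =====
-- def GetFullMainSeq(MainSeq, SubSeqs):
--     # Iterative DFS with an explicit stack of iterators instead of recursion + memo dict.
--     FullMainSeq = []
--     stack = [iter(MainSeq)]
--     while stack:
--         s = next(stack[-1], None)
--         if s is None:
--             stack.pop()
--         elif s[0] in ('M', 'D'):
--             FullMainSeq.append([s[1], s[2]])
--         elif s[0] == 'S':
--             stack.append(iter(SubSeqs[s[1]]))
--     return FullMainSeq
-- ===== Notes on version B (the rewrite author's own statement) =====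
-- stated objective: alternative
-- what changed: Replaces the recursive expansion with a per-call memo dict by an explicit iterative DFS over a stack of iterators that emits sub-sequence expansions in place.
import Mathlib
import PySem

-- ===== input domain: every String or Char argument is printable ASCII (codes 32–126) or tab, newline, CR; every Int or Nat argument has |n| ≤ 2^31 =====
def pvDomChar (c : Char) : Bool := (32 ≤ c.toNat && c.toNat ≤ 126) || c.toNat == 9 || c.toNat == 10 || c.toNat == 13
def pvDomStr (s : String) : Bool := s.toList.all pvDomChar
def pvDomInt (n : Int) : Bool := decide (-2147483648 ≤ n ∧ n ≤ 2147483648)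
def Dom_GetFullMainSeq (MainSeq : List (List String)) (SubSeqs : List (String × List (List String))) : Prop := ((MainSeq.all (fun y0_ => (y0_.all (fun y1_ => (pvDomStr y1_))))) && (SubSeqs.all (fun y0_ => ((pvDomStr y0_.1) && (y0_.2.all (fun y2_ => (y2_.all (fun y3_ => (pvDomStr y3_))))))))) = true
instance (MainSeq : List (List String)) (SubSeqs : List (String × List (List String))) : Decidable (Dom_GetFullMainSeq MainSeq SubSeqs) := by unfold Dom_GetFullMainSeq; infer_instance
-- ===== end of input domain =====

-- B replaces A's recursion with per-call memo dict by an explicit iterative DFS over a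
-- stack of iterators (objective: alternative decomposition, same cost).

-- Python dict lookup SubSeqs[k] (first-match semantics, missing key excluded by Pre_).
def pvLook (SubSeqs : List (String × List (List String))) (k : String) : List (List String) :=
  (PySem.Dict.mk SubSeqs).getD k []

-- ===== PORT A =====
-- A's for-loop as structural recursion over the remaining list, state = (SubSeqsFull memo, FullMainSeq).
-- The Nat fuel only bounds the recursion depth (Python A raises RecursionError on cyclic
-- references, which Pre_ excludes); under Pre_ the fuel-0 branch is never reached.
def pvA (SubSeqs : List (String × List (List String))) :
    Nat → List (List String) →
    PySem.Dict String (List (List String)) × List (List String) →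
    PySem.Dict String (List (List String)) × List (List String)
  | _, [], st => st
  | f, s :: tl, st =>
    pvA SubSeqs f tl
      (if s.getD 0 "" = "M" then (st.1, st.2 ++ [[s.getD 1 "", s.getD 2 ""]])
       else if s.getD 0 "" = "S" then
         let memo := if (st.1.get? (s.getD 1 "")).isSome then st.1
           else st.1.insert (s.getD 1 "")
             (match f with
              | 0 => []
              | n+1 => (pvA SubSeqs n (pvLook SubSeqs (s.getD 1 "")) (PySem.Dict.empty, [])).2)
         (memo, st.2 ++ memo.getD (s.getD 1 "") [])
       else if s.getD 0 "" = "D" then (st.1, st.2 ++ [[s.getD 1 "", s.getD 2 ""]])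
       else st)
  termination_by f seq _ => (f, seq.length)
  decreasing_by
  · exact Prod.Lex.left _ _ (by omega)
  · exact Prod.Lex.right _ (by simp)

def GetFullMainSeq (MainSeq : List (List String)) (SubSeqs : List (String × List (List String))) : List (List String) :=
  (pvA SubSeqs (SubSeqs.length + 1) MainSeq (PySem.Dict.empty, [])).2

-- ===== PORT B =====
-- B's while-loop over a stack of iterators; each iterator is the list of its remaining
-- elements.  Fuel is consumed only when a sub-sequence is pushed (Python B loops forever
-- on cyclic references, excluded by Pre_); under Pre_ the fuel-0 branch is never reached.
def pvB (SubSeqs : List (String × List (List String))) :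
    Nat → List (List (List String)) → List (List String) → List (List String)
  | _, [], out => out
  | f, [] :: rest, out => pvB SubSeqs f rest out
  | f, (s :: tl) :: rest, out =>
    if s.getD 0 "" = "M" ∨ s.getD 0 "" = "D" then
      pvB SubSeqs f (tl :: rest) (out ++ [[s.getD 1 "", s.getD 2 ""]])
    else if s.getD 0 "" = "S" then
      match f with
      | 0 => out
      | n+1 => pvB SubSeqs n (pvLook SubSeqs (s.getD 1 "") :: tl :: rest) out
    else pvB SubSeqs f (tl :: rest) out
  termination_by f stack _ => (f, (stack.map List.length).sum + stack.length)
  decreasing_by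
  · exact Prod.Lex.right _ (by simp)
  · exact Prod.Lex.right _ (by simp)
  · exact Prod.Lex.left _ _ (by omega)
  · exact Prod.Lex.right _ (by simp)

def GetFullMainSeq_alt (MainSeq : List (List String)) (SubSeqs : List (String × List (List String))) : List (List String) :=
  pvB SubSeqs
    ((MainSeq.length + (SubSeqs.map (fun p => p.2.length)).sum + 1) ^ (SubSeqs.length + 1))
    [MainSeq] []

-- ===== PRECONDITION & SPEC =====
-- Closed-form helpers describing the reference graph of the input.
-- keys referenced by the 'S' elements of a sequence
def pvRefs (seq : List (List String)) : List String :=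
  seq.filterMap (fun s => if s.getD 0 "" = "S" then some (s.getD 1 "") else none)

-- one step of the reference graph: all keys referenced from the values of keys in R
def pvImg (SubSeqs : List (String × List (List String))) (R : List String) : List String :=
  R.flatMap (fun k => pvRefs (pvLook SubSeqs k))

-- every key reachable from MainSeq through the reference graph
def pvReachKeys (MainSeq : List (List String)) (SubSeqs : List (String × List (List String))) : List String :=
  (List.range (SubSeqs.length + 1)).flatMap (fun i => (pvImg SubSeqs)^[i] (pvRefs MainSeq))

-- an element A can process without IndexError/KeyError
def pvWFel (SubSeqs : List (String × List (List String))) (s : List String) : Bool :=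
  !s.isEmpty &&
  ((s.getD 0 "" != "M" && s.getD 0 "" != "D") || decide (3 ≤ s.length)) &&
  (s.getD 0 "" != "S" || (decide (2 ≤ s.length) && (SubSeqs.map Prod.fst).contains (s.getD 1 "")))

-- Pre_ = exactly the inputs where Python A returns: every processed element (of MainSeq and
-- of every reachable sub-sequence) is long enough for its tag and references an existing key
-- (else IndexError/KeyError), and all reference chains from MainSeq die out within
-- |SubSeqs| steps, i.e. the reachable reference graph is acyclic (else RecursionError).
def Pre_GetFullMainSeq (MainSeq : List (List String)) (SubSeqs : List (String × List (List String))) : Prop :=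
  (∀ s ∈ MainSeq, pvWFel SubSeqs s = true) ∧
  (∀ k ∈ pvReachKeys MainSeq SubSeqs, ∀ s ∈ pvLook SubSeqs k, pvWFel SubSeqs s = true) ∧
  (pvImg SubSeqs)^[SubSeqs.length] (pvRefs MainSeq) = []
instance (MainSeq : List (List String)) (SubSeqs : List (String × List (List String))) : Decidable (Pre_GetFullMainSeq MainSeq SubSeqs) := by unfold Pre_GetFullMainSeq; infer_instance

def pvWitness_GetFullMainSeq : List (List String) × (List (String × List (List String))) :=
  ([["M", "a", "b"], ["S", "x"]], [("x", [["D", "c", "d"]])])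

def Spec_GetFullMainSeq (MainSeq : List (List String)) (SubSeqs : List (String × List (List String))) (out : List (List String)) : Prop := out = GetFullMainSeq_alt MainSeq SubSeqs
instance (MainSeq : List (List String)) (SubSeqs : List (String × List (List String))) (out : List (List String)) : Decidable (Spec_GetFullMainSeq MainSeq SubSeqs out) := by unfold Spec_GetFullMainSeq; infer_instance

-- ===== CLAIM (what is proved, stated in full; the proofs are below) =====
def Claim_equal_GetFullMainSeq : Prop := ∀ (MainSeq : List (List String)) (SubSeqs : List (String × List (List String))), Dom_GetFullMainSeq MainSeq SubSeqs → Pre_GetFullMainSeq MainSeq SubSeqs → Spec_GetFullMainSeq MainSeq SubSeqs (GetFullMainSeq MainSeq SubSeqs)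

-- ===== LEMMAS AND PROOFS =====

-- fuel n suffices for every reference chain out of seq
inductive pvSuff (SubSeqs : List (String × List (List String))) : Nat → List (List String) → Prop where
  | mk (n : Nat) (seq : List (List String))
      (h : ∀ s ∈ seq, s.getD 0 "" = "S" → pvSuff SubSeqs n (pvLook SubSeqs (s.getD 1 ""))) :
      pvSuff SubSeqs (n+1) seq

-- the common specification: full expansion at fuel f
def pvE (SubSeqs : List (String × List (List String))) : Nat → List (List String) → List (List String)
  | _, [] => []
  | f, s :: tl =>
    (if s.getD 0 "" = "M" ∨ s.getD 0 "" = "D" then [[s.getD 1 "", s.getD 2 ""]]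
     else if s.getD 0 "" = "S" then
       match f with
       | 0 => []
       | n+1 => pvE SubSeqs n (pvLook SubSeqs (s.getD 1 ""))
     else []) ++ pvE SubSeqs f tl
  termination_by f seq => (f, seq.length)
  decreasing_by
  · exact Prod.Lex.left _ _ (by omega)
  · exact Prod.Lex.right _ (by simp)

-- number of sub-sequence pushes performed while expanding at fuel f
def pvC (SubSeqs : List (String × List (List String))) : Nat → List (List String) → Nat
  | _, [] => 0
  | f, s :: tl =>
    (if s.getD 0 "" = "S" then
       1 + (match f with
            | 0 => 0
            | n+1 => pvC SubSeqs n (pvLook SubSeqs (s.getD 1 "")))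
     else 0) + pvC SubSeqs f tl
  termination_by f seq => (f, seq.length)
  decreasing_by
  · exact Prod.Lex.left _ _ (by omega)
  · exact Prod.Lex.right _ (by simp)

theorem pvSuff_mono {S : List (String × List (List String))} {n : Nat} {seq : List (List String)}
    (h : pvSuff S n seq) : pvSuff S (n+1) seq := by
  induction h with
  | mk n seq h ih => exact .mk _ _ (fun s hs hS => ih s hs hS)

theorem pvSuff_cons {S : List (String × List (List String))} {n : Nat} {s : List String}
    {tl : List (List String)} (h : pvSuff S n (s :: tl)) : pvSuff S n tl := by
  cases h with
  | mk m _ h => exact .mk _ _ (fun x hx hX => h x (List.mem_cons_of_mem _ hx) hX)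

theorem pvSuff_head {S : List (String × List (List String))} {n : Nat} {s : List String}
    {tl : List (List String)} (h : pvSuff S n (s :: tl)) (hS : s.getD 0 "" = "S") :
    ∃ m, n = m + 1 ∧ pvSuff S m (pvLook S (s.getD 1 "")) := by
  cases h with
  | mk m _ h => exact ⟨m, rfl, h s (List.mem_cons_self) hS⟩

theorem pvE_congr_level (S : List (String × List (List String))) (n : Nat) :
    ∀ (l : List (List String)),
      (∀ s ∈ l, s.getD 0 "" = "S" → ∀ m, n ≤ m →
        pvE S m (pvLook S (s.getD 1 "")) = pvE S n (pvLook S (s.getD 1 ""))) →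
      ∀ m, n + 1 ≤ m → pvE S m l = pvE S (n+1) l := by
  intro l
  induction l with
  | nil => intro _ m _; cases m <;> simp [pvE]
  | cons s tl ih =>
    intro h m hm
    obtain ⟨m', rfl⟩ : ∃ m', m = m' + 1 := ⟨m - 1, by omega⟩
    rw [pvE, pvE]
    have htl := ih (fun x hx => h x (List.mem_cons_of_mem _ hx)) (m' + 1) hm
    by_cases hMD : s.getD 0 "" = "M" ∨ s.getD 0 "" = "D"
    · simp only [if_pos hMD, htl]
    · by_cases hS : s.getD 0 "" = "S"
      · simp only [if_neg hMD, if_pos hS, htl]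
        have h1 := h s (List.mem_cons_self) hS m' (by omega)
        have h2 := h s (List.mem_cons_self) hS n (le_refl n)
        rw [h1, h2]
      · simp only [if_neg hMD, if_neg hS, htl]

theorem pvE_stable {S : List (String × List (List String))} {n : Nat} {seq : List (List String)}
    (h : pvSuff S n seq) : ∀ m, n ≤ m → pvE S m seq = pvE S n seq := by
  induction h with
  | mk n seq h ih =>
    intro m hm
    exact pvE_congr_level S n seq (fun s hs hS m' hm' => ih s hs hS m' hm') m hm

theorem pvC_congr_level (S : List (String × List (List String))) (n : Nat) :
    ∀ (l : List (List String)),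
      (∀ s ∈ l, s.getD 0 "" = "S" → ∀ m, n ≤ m →
        pvC S m (pvLook S (s.getD 1 "")) = pvC S n (pvLook S (s.getD 1 ""))) →
      ∀ m, n + 1 ≤ m → pvC S m l = pvC S (n+1) l := by
  intro l
  induction l with
  | nil => intro _ m _; cases m <;> simp [pvC]
  | cons s tl ih =>
    intro h m hm
    obtain ⟨m', rfl⟩ : ∃ m', m = m' + 1 := ⟨m - 1, by omega⟩
    rw [pvC, pvC]
    have htl := ih (fun x hx => h x (List.mem_cons_of_mem _ hx)) (m' + 1) hm
    by_cases hS : s.getD 0 "" = "S"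
    · simp only [if_pos hS, htl]
      have h1 := h s (List.mem_cons_self) hS m' (by omega)
      have h2 := h s (List.mem_cons_self) hS n (le_refl n)
      rw [h1, h2]
    · simp only [if_neg hS, htl]

theorem pvC_stable {S : List (String × List (List String))} {n : Nat} {seq : List (List String)}
    (h : pvSuff S n seq) : ∀ m, n ≤ m → pvC S m seq = pvC S n seq := by
  induction h with
  | mk n seq h ih =>
    intro m hm
    exact pvC_congr_level S n seq (fun s hs hS m' hm' => ih s hs hS m' hm') m hm

-- memo value that A's dict stores for key k at fuel f
def pvMval (S : List (String × List (List String))) (f : Nat) (k : String) : List (List String) :=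
  match f with
  | 0 => []
  | n+1 => pvE S n (pvLook S k)

theorem pvE_nil (S : List (String × List (List String))) (f : Nat) : pvE S f [] = [] := by
  cases f <;> rw [pvE]

theorem pvC_nil (S : List (String × List (List String))) (f : Nat) : pvC S f [] = 0 := by
  cases f <;> rw [pvC]

theorem pvC_cons_notS (S : List (String × List (List String))) (f : Nat) (s : List String)
    (tl : List (List String)) (hS : s.getD 0 "" ≠ "S") :
    pvC S f (s :: tl) = pvC S f tl := by
  cases f <;> rw [pvC, if_neg hS] <;> simp

theorem pvE_cons_MD (S : List (String × List (List String))) (f : Nat) (s : List String)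
    (tl : List (List String)) (hMD : s.getD 0 "" = "M" ∨ s.getD 0 "" = "D") :
    pvE S f (s :: tl) = [[s.getD 1 "", s.getD 2 ""]] ++ pvE S f tl := by
  cases f <;> rw [pvE, if_pos hMD]

theorem pvE_cons_other (S : List (String × List (List String))) (f : Nat) (s : List String)
    (tl : List (List String)) (hMD : ¬(s.getD 0 "" = "M" ∨ s.getD 0 "" = "D"))
    (hS : s.getD 0 "" ≠ "S") :
    pvE S f (s :: tl) = pvE S f tl := by
  cases f <;> rw [pvE, if_neg hMD, if_neg hS] <;> simp

-- the value A's recursion stores for a missing key at fuel f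
def pvAW (S : List (String × List (List String))) (f : Nat) (k : String) : List (List String) :=
  match f with
  | 0 => []
  | n+1 => (pvA S n (pvLook S k) (PySem.Dict.empty, [])).2

theorem pvA_nil (S : List (String × List (List String))) (f : Nat)
    (st : PySem.Dict String (List (List String)) × List (List String)) :
    pvA S f [] st = st := by
  cases f <;> rw [pvA]

theorem pvA_cons_MD (S : List (String × List (List String))) (f : Nat) (s : List String)
    (tl : List (List String)) (st : PySem.Dict String (List (List String)) × List (List String))
    (hMD : s.getD 0 "" = "M" ∨ s.getD 0 "" = "D") :
    pvA S f (s :: tl) st = pvA S f tl (st.1, st.2 ++ [[s.getD 1 "", s.getD 2 ""]]) := by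
  rcases hMD with h | h
  · cases f <;> rw [pvA] <;> rw [if_pos h]
  · have h1 : s.getD 0 "" ≠ "M" := by rw [h]; decide
    have h2 : s.getD 0 "" ≠ "S" := by rw [h]; decide
    cases f <;> rw [pvA] <;> rw [if_neg h1, if_neg h2, if_pos h]

theorem pvA_cons_S_hit (S : List (String × List (List String))) (f : Nat) (s : List String)
    (tl : List (List String)) (st : PySem.Dict String (List (List String)) × List (List String))
    (hM : s.getD 0 "" ≠ "M") (hS : s.getD 0 "" = "S")
    (hhit : (st.1.get? (s.getD 1 "")).isSome = true) :
    pvA S f (s :: tl) st = pvA S f tl (st.1, st.2 ++ st.1.getD (s.getD 1 "") []) := by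
  cases f <;> rw [pvA] <;> rw [if_neg hM, if_pos hS, if_pos hhit]

theorem pvA_cons_S_miss (S : List (String × List (List String))) (f : Nat) (s : List String)
    (tl : List (List String)) (st : PySem.Dict String (List (List String)) × List (List String))
    (hM : s.getD 0 "" ≠ "M") (hS : s.getD 0 "" = "S")
    (hmiss : ¬ (st.1.get? (s.getD 1 "")).isSome = true) :
    pvA S f (s :: tl) st =
      pvA S f tl (st.1.insert (s.getD 1 "") (pvAW S f (s.getD 1 "")),
        st.2 ++ (st.1.insert (s.getD 1 "") (pvAW S f (s.getD 1 ""))).getD (s.getD 1 "") []) := by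
  cases f <;> rw [pvA] <;> rw [if_neg hM, if_pos hS, if_neg hmiss] <;> rfl

theorem pvA_cons_other (S : List (String × List (List String))) (f : Nat) (s : List String)
    (tl : List (List String)) (st : PySem.Dict String (List (List String)) × List (List String))
    (hM : s.getD 0 "" ≠ "M") (hS : s.getD 0 "" ≠ "S") (hD : s.getD 0 "" ≠ "D") :
    pvA S f (s :: tl) st = pvA S f tl st := by
  cases f <;> rw [pvA] <;> rw [if_neg hM, if_neg hS, if_neg hD]

theorem pvE_cons_S (S : List (String × List (List String))) (f : Nat) (s : List String)
    (tl : List (List String)) (hMD : ¬(s.getD 0 "" = "M" ∨ s.getD 0 "" = "D"))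
    (hS : s.getD 0 "" = "S") :
    pvE S f (s :: tl) = pvMval S f (s.getD 1 "") ++ pvE S f tl := by
  cases f <;> rw [pvE, if_neg hMD, if_pos hS] <;> rfl

theorem pvA_eq (S : List (String × List (List String))) :
    ∀ (f : Nat) (seq : List (List String)) (memo : PySem.Dict String (List (List String)))
      (out : List (List String)),
      (∀ k v, memo.get? k = some v → v = pvMval S f k) →
      (pvA S f seq (memo, out)).2 = out ++ pvE S f seq ∧
      (∀ k v, (pvA S f seq (memo, out)).1.get? k = some v → v = pvMval S f k) := by
  intro f
  induction f using Nat.strong_induction_on with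
  | _ f ihf =>
    intro seq
    induction seq with
    | nil =>
      intro memo out hinv
      rw [pvA_nil, pvE_nil]
      exact ⟨by simp, hinv⟩
    | cons s tl iht =>
      intro memo out hinv
      have hw : pvAW S f (s.getD 1 "") = pvMval S f (s.getD 1 "") := by
        cases f with
        | zero => rfl
        | succ n =>
          have hemp : ∀ (k : String) (v : List (List String)),
              (PySem.Dict.empty (κ := String) (ν := List (List String))).get? k = some v →
              v = pvMval S n k := by
            intro k v hkv
            rw [PySem.Dict.get?_empty] at hkv
            exact absurd hkv (by simp)
          have := (ihf n (by omega) (pvLook S (s.getD 1 "")) PySem.Dict.empty [] hemp).1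
          simpa [pvAW, pvMval] using this
      by_cases hM : s.getD 0 "" = "M"
      · rw [pvA_cons_MD S f s tl (memo, out) (Or.inl hM)]
        obtain ⟨h1, h2⟩ := iht memo (out ++ [[s.getD 1 "", s.getD 2 ""]]) hinv
        refine ⟨?_, h2⟩
        rw [h1, pvE_cons_MD S f s tl (Or.inl hM)]
        simp
      · by_cases hS : s.getD 0 "" = "S"
        · have hD : s.getD 0 "" ≠ "D" := by rw [hS]; decide
          have hMD : ¬(s.getD 0 "" = "M" ∨ s.getD 0 "" = "D") := not_or.mpr ⟨hM, hD⟩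
          by_cases hhit : (memo.get? (s.getD 1 "")).isSome = true
          · rw [pvA_cons_S_hit S f s tl (memo, out) hM hS hhit]
            obtain ⟨v, hv⟩ := Option.isSome_iff_exists.mp hhit
            have hval : v = pvMval S f (s.getD 1 "") := hinv _ _ hv
            have hgd : memo.getD (s.getD 1 "") [] = v := by
              rw [PySem.Dict.getD_eq_get?_getD, hv]
              rfl
            obtain ⟨h1, h2⟩ := iht memo (out ++ memo.getD (s.getD 1 "") []) hinv
            refine ⟨?_, h2⟩
            rw [h1, pvE_cons_S S f s tl hMD hS, hgd, hval]
            simp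
          · rw [pvA_cons_S_miss S f s tl (memo, out) hM hS hhit]
            have hinv' : ∀ k v,
                (memo.insert (s.getD 1 "") (pvAW S f (s.getD 1 ""))).get? k = some v →
                v = pvMval S f k := by
              intro k v hkv
              rw [PySem.Dict.get?_insert] at hkv
              split_ifs at hkv with hk
              · subst hk
                rw [← hw]
                exact (Option.some_injective _ hkv.symm)
              · exact hinv _ _ hkv
            have hgd : (memo.insert (s.getD 1 "") (pvAW S f (s.getD 1 ""))).getD
                (s.getD 1 "") [] = pvMval S f (s.getD 1 "") := by
              rw [← hw, PySem.Dict.getD_insert_self]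
            obtain ⟨h1, h2⟩ := iht _ _ hinv'
            refine ⟨?_, h2⟩
            rw [h1, hgd, pvE_cons_S S f s tl hMD hS]
            simp
        · by_cases hD : s.getD 0 "" = "D"
          · rw [pvA_cons_MD S f s tl (memo, out) (Or.inr hD)]
            obtain ⟨h1, h2⟩ := iht memo (out ++ [[s.getD 1 "", s.getD 2 ""]]) hinv
            refine ⟨?_, h2⟩
            rw [h1, pvE_cons_MD S f s tl (Or.inr hD)]
            simp
          · rw [pvA_cons_other S f s tl (memo, out) hM hS hD]
            have hMD : ¬(s.getD 0 "" = "M" ∨ s.getD 0 "" = "D") := not_or.mpr ⟨hM, hD⟩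
            obtain ⟨h1, h2⟩ := iht memo out hinv
            refine ⟨?_, h2⟩
            rw [h1, pvE_cons_other S f s tl hMD hS]

theorem pvB_eq (S : List (String × List (List String))) (F : Nat) :
    ∀ (f : Nat) (stack : List (List (List String))) (out : List (List String)),
      (∀ fr ∈ stack, pvSuff S F fr) → (stack.map (pvC S F)).sum ≤ f →
      pvB S f stack out = out ++ (stack.map (pvE S F)).flatten := by
  intro f stack out
  fun_induction pvB S f stack out with
  | case1 f out =>
    intro _ _
    simp
  | case2 f rest out ih =>
    intro hfr hsum
    rw [ih (fun fr h => hfr fr (List.mem_cons_of_mem _ h)) (by simpa [pvC_nil] using hsum)]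
    simp [pvE_nil]
  | case3 f s tl rest out hMD ih =>
    intro hfr hsum
    have hS : s.getD 0 "" ≠ "S" := by
      rcases hMD with h | h <;> rw [h] <;> decide
    have hfr' : ∀ fr ∈ tl :: rest, pvSuff S F fr := by
      intro fr h
      rcases List.mem_cons.mp h with rfl | h
      · exact pvSuff_cons (hfr _ List.mem_cons_self)
      · exact hfr fr (List.mem_cons_of_mem _ h)
    have hsum' : ((tl :: rest).map (pvC S F)).sum ≤ f := by
      have hC := pvC_cons_notS S F s tl hS
      simp only [List.map_cons, List.sum_cons] at hsum ⊢
      omega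
    rw [ih hfr' hsum']
    simp only [List.map_cons, List.flatten_cons]
    rw [pvE_cons_MD S F s tl hMD]
    simp
  | case4 s tl rest out hMD hS =>
    intro hfr hsum
    exfalso
    simp only [List.map_cons, List.sum_cons] at hsum
    obtain ⟨m, hFm, _⟩ := pvSuff_head (hfr _ List.mem_cons_self) hS
    subst hFm
    rw [pvC, if_pos hS] at hsum
    omega
  | case5 s tl rest out hMD hS n ih =>
    intro hfr hsum
    obtain ⟨m, hFm, hlook⟩ := pvSuff_head (hfr _ List.mem_cons_self) hS
    subst hFm
    have htlS : pvSuff S (m+1) tl := pvSuff_cons (hfr _ List.mem_cons_self)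
    have hfr' : ∀ fr ∈ pvLook S (s.getD 1 "") :: tl :: rest, pvSuff S (m+1) fr := by
      intro fr h
      rcases List.mem_cons.mp h with rfl | h
      · exact pvSuff_mono hlook
      · rcases List.mem_cons.mp h with rfl | h
        · exact htlS
        · exact hfr fr (List.mem_cons_of_mem _ h)
    have hCst := pvC_stable hlook (m+1) (by omega)
    have hEst := pvE_stable hlook (m+1) (by omega)
    have hsum' : ((pvLook S (s.getD 1 "") :: tl :: rest).map (pvC S (m+1))).sum ≤ n := by
      simp only [List.map_cons, List.sum_cons] at hsum ⊢
      rw [pvC, if_pos hS] at hsum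
      simp only [Nat.succ_eq_add_one] at hsum ⊢
      omega
    rw [ih hfr' hsum']
    simp only [List.map_cons, List.flatten_cons]
    rw [pvE, if_neg hMD, if_pos hS]
    rw [hEst]
    simp
  | case6 f s tl rest out hMD hS ih =>
    intro hfr hsum
    have hfr' : ∀ fr ∈ tl :: rest, pvSuff S F fr := by
      intro fr h
      rcases List.mem_cons.mp h with rfl | h
      · exact pvSuff_cons (hfr _ List.mem_cons_self)
      · exact hfr fr (List.mem_cons_of_mem _ h)
    have hsum' : ((tl :: rest).map (pvC S F)).sum ≤ f := by
      have hC := pvC_cons_notS S F s tl hS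
      simp only [List.map_cons, List.sum_cons] at hsum ⊢
      omega
    rw [ih hfr' hsum']
    simp only [List.map_cons, List.flatten_cons]
    rw [pvE_cons_other S F s tl hMD hS]

theorem pvLook_len (S : List (String × List (List String))) (k : String) :
    (pvLook S k).length ≤ (S.map (fun p => p.2.length)).sum := by
  induction S with
  | nil => simp [pvLook, PySem.Dict.getD, PySem.Dict.get?]
  | cons p rest ih =>
    simp only [pvLook, PySem.Dict.getD, PySem.Dict.get?] at ih ⊢
    by_cases hp : p.1 == k
    · simp [List.find?, hp]
    · simp only [List.find?, hp, List.map_cons, List.sum_cons]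
      exact le_trans ih (by omega)

theorem pvC_bound (S : List (String × List (List String))) (T : Nat)
    (hT : ∀ k, (pvLook S k).length ≤ T) :
    ∀ (d : Nat) (seq : List (List String)), pvSuff S d seq → seq.length ≤ T →
      pvC S d seq ≤ (T+1)^d - 1 := by
  intro d seq hsuff
  induction hsuff with
  | mk n seq h ih =>
    intro hlen
    have hpow : 1 ≤ (T+1)^n := Nat.one_le_pow _ _ (by omega)
    have inner : ∀ l, (∀ s ∈ l, s ∈ seq) → pvC S (n+1) l ≤ l.length * (T+1)^n := by
      intro l
      induction l with
      | nil => simp [pvC]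
      | cons s tl iht =>
        intro hmem
        rw [pvC]
        simp only [Nat.succ_eq_add_one]
        have htl := iht (fun x hx => hmem x (List.mem_cons_of_mem _ hx))
        have hdist : (tl.length + 1) * (T+1)^n = tl.length * (T+1)^n + (T+1)^n := by ring
        by_cases hS : s.getD 0 "" = "S"
        · rw [if_pos hS]
          have hsub := ih s (hmem s List.mem_cons_self) hS (hT _)
          simp only [List.length_cons]
          omega
        · rw [if_neg hS]
          simp only [List.length_cons]
          omega
    have hmain := inner seq (fun s hs => hs)
    have hmul : seq.length * (T+1)^n ≤ T * (T+1)^n := Nat.mul_le_mul_right _ hlen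
    have hsucc : (T+1)^(n+1) = T * (T+1)^n + (T+1)^n := by ring
    omega

theorem pvImg_iter_mono (S : List (String × List (List String))) :
    ∀ (n : Nat) (X Y : List String), X ⊆ Y → (pvImg S)^[n] X ⊆ (pvImg S)^[n] Y := by
  intro n
  induction n with
  | zero => intro X Y h; simpa using h
  | succ n ih =>
    intro X Y h
    rw [Function.iterate_succ_apply, Function.iterate_succ_apply]
    apply ih
    intro a ha
    rw [pvImg, List.mem_flatMap] at ha ⊢
    obtain ⟨k, hk, hak⟩ := ha
    exact ⟨k, h hk, hak⟩

theorem pvSuff_of_iter (S : List (String × List (List String))) :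
    ∀ (n : Nat) (seq : List (List String)),
      (pvImg S)^[n] (pvRefs seq) = [] → pvSuff S (n+1) seq := by
  intro n
  induction n with
  | zero =>
    intro seq h
    simp only [Function.iterate_zero, id_eq] at h
    refine .mk 0 seq (fun s hs hS => ?_)
    exfalso
    have hm : s.getD 1 "" ∈ pvRefs seq :=
      List.mem_filterMap.mpr ⟨s, hs, by rw [if_pos hS]⟩
    rw [h] at hm
    simp at hm
  | succ n ih =>
    intro seq h
    refine .mk (n+1) seq (fun s hs hS => ih _ ?_)
    have hk : s.getD 1 "" ∈ pvRefs seq :=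
      List.mem_filterMap.mpr ⟨s, hs, by rw [if_pos hS]⟩
    have hsub : pvRefs (pvLook S (s.getD 1 "")) ⊆ pvImg S (pvRefs seq) := by
      intro a ha
      exact List.mem_flatMap.mpr ⟨_, hk, ha⟩
    have := pvImg_iter_mono S n _ _ hsub
    rw [Function.iterate_succ_apply] at h
    rw [h] at this
    exact List.eq_nil_iff_forall_not_mem.mpr (fun a ha => by simpa using this ha)

-- ===== VERDICT (by name: the statement is the Claim_ definition above) =====
theorem GetFullMainSeq_spec : Claim_equal_GetFullMainSeq := by
  intro Main S _ hPre
  unfold Spec_GetFullMainSeq GetFullMainSeq GetFullMainSeq_alt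
  obtain ⟨_, _, hAcyc⟩ := hPre
  have hSuff : pvSuff S (S.length + 1) Main := pvSuff_of_iter S S.length Main hAcyc
  -- A's side
  have hA := (pvA_eq S (S.length + 1) Main PySem.Dict.empty []
    (fun k v hv => by simp [PySem.Dict.get?_empty] at hv)).1
  -- B's side
  set T := Main.length + (S.map (fun p => p.2.length)).sum with hTdef
  have hT : ∀ k, (pvLook S k).length ≤ T := fun k => le_trans (pvLook_len S k) (by omega)
  have hcost : pvC S (S.length + 1) Main ≤ (T+1)^(S.length+1) - 1 :=
    pvC_bound S T hT (S.length + 1) Main hSuff (by omega)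
  have hB := pvB_eq S (S.length + 1) ((T + 1) ^ (S.length + 1)) [Main] []
    (by intro fr hfr; simp at hfr; subst hfr; exact hSuff)
    (by simpa using le_trans hcost (Nat.sub_le _ _))
  rw [hA, hB]
  simp
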